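-- pv_equiv track=rewrite | github.com/Enkerli/MIDIcurator | scripts/dump-sequ.py | group_note_ons
-- ===== SOURCE A (Python) =====
-- def group_note_ons(events: list[tuple[int, str, int, int]], tol_ticks: int = 30) -> list[tuple[int, list[int]]]:
--     """
--     Group simultaneous (within tol_ticks) noteOn events into chord groups.
--     Returns [(onset_tick, [pitches...])] sorted by onset.
--     """
--     groups: list[tuple[int, list[int]]] = []
--     note_ons = [(t, n) for t, typ, n, v in events if typ == "noteOn" and v > 0]
--     note_ons.sort()
--     i = 0
--     while i < len(note_ons):
--         t0, n0 = note_ons[i]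
--         group = [n0]
--         j = i + 1
--         while j < len(note_ons) and note_ons[j][0] - t0 <= tol_ticks:
--             group.append(note_ons[j][1])
--             j += 1
--         groups.append((t0, group))
--         i = j
--     return groups
-- ===== SOURCE B (Python) =====
-- def group_note_ons(events: list[tuple[int, str, int, int]], tol_ticks: int = 30) -> list[tuple[int, list[int]]]:
--     """Parallel-array variant: after sorting, keep ticks and pitches in separate
--     lists and locate each chord's right edge by binary search over the tick
--     array instead of a linear element-by-element scan; the group is then cut
--     out as one slice."""
--     pairs = sorted((t, n) for t, typ, n, v in events if typ == "noteOn" and v > 0)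
--     ticks = [t for t, _ in pairs]
--     pitches = [n for _, n in pairs]
--     groups: list[tuple[int, list[int]]] = []
--     i, m = 0, len(pairs)
--     while i < m:
--         bound = ticks[i] + tol_ticks
--         lo, hi = i + 1, m
--         while lo < hi:  # first index > i with tick > bound
--             mid = (lo + hi) // 2
--             if ticks[mid] <= bound:
--                 lo = mid + 1
--             else:
--                 hi = mid
--         groups.append((ticks[i], pitches[i:lo]))
--         i = lo
--     return groups
-- ===== Notes on version B (the rewrite author's own statement) =====
-- stated objective: alternative
-- what changed: B keeps the sorted note-ons as parallel tick/pitch arrays and locates each chord's right edge by binary search over the tick array plus one slice, instead of A's element-by-element inner while-scan appending pitches one at a time.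
import Mathlib
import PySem

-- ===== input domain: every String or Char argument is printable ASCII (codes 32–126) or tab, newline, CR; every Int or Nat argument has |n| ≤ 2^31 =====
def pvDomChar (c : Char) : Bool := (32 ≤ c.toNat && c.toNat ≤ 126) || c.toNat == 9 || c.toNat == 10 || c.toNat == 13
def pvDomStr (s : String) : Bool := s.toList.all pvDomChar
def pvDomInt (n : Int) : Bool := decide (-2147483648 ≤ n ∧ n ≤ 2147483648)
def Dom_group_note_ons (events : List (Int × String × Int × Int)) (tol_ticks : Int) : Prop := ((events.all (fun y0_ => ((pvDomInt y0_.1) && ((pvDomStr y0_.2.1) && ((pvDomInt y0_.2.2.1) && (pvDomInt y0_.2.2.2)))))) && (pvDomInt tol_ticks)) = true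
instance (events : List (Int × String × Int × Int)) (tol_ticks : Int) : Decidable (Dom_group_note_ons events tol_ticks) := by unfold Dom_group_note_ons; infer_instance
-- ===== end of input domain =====

-- B splits the sorted note-ons into parallel tick/pitch arrays and finds each chord's
-- right edge by binary search plus one slice, instead of A's element-by-element inner
-- scan (objective: alternative; same result proved equal).

-- ===== PORT A =====
-- outer while-loop of A: each step consumes the head (note_ons[i]) and, via the inner
-- while, all following pairs whose tick is within tol of the anchor t0 (takeWhile /
-- dropWhile render the inner 'while j < len and note_ons[j][0] - t0 <= tol' scan).
-- (the fuel argument only makes the recursion structural: note_ons.length steps always suffice)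
def pvAOuter (tol : Int) : Nat → List (Int × Int) → List (Int × List Int)
  | 0, _ => []
  | _ + 1, [] => []
  | fuel + 1, (t0, n0) :: rest =>
      (t0, n0 :: (rest.takeWhile (fun p => decide (p.1 - t0 ≤ tol))).map Prod.snd) ::
      pvAOuter tol fuel (rest.dropWhile (fun p => decide (p.1 - t0 ≤ tol)))

def group_note_ons (events : List (Int × String × Int × Int)) (tol_ticks : Int) : List (Int × List Int) :=
  let note_ons :=
    PySem.List.sorted2
      ((events.filter (fun e => e.2.1 == "noteOn" && decide (0 < e.2.2.2))).map
        (fun e => (e.1, e.2.2.1)))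
      Prod.fst Prod.snd
  pvAOuter tol_ticks note_ons.length note_ons

-- ===== PORT B =====
-- inner while of B: binary search for the first index in [lo, hi) whose tick
-- exceeds the bound (returns hi if none)
-- (fuel = hi - lo at the call site; it only makes the recursion structural)
def pvBsearch (ticks : List Int) (bound : Int) : Nat → Nat → Nat → Nat
  | 0, lo, _ => lo
  | fuel + 1, lo, hi =>
    if lo < hi then
      let mid := (lo + hi) / 2
      if PySem.List.pyGetD ticks (mid : Int) 0 ≤ bound then pvBsearch ticks bound fuel (mid + 1) hi
      else pvBsearch ticks bound fuel lo mid
    else lo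

-- outer while of B: i jumps straight to the binary-search result
def pvBOuter (ticks pitches : List Int) (tol : Int) : Nat → Nat → List (Int × List Int)
  | 0, _ => []
  | fuel + 1, i =>
    if i < ticks.length then
      let bound := PySem.List.pyGetD ticks (i : Int) 0 + tol
      let lo := pvBsearch ticks bound (ticks.length - (i + 1)) (i + 1) ticks.length
      (PySem.List.pyGetD ticks (i : Int) 0,
        PySem.List.slice pitches (some (i : Int)) (some (lo : Int))) ::
        pvBOuter ticks pitches tol fuel lo
    else []

def group_note_ons_alt (events : List (Int × String × Int × Int)) (tol_ticks : Int) : List (Int × List Int) :=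
  let pairs :=
    PySem.List.sorted2
      ((events.filter (fun e => e.2.1 == "noteOn" && decide (0 < e.2.2.2))).map
        (fun e => (e.1, e.2.2.1)))
      Prod.fst Prod.snd
  let ticks := pairs.map Prod.fst
  let pitches := pairs.map Prod.snd
  pvBOuter ticks pitches tol_ticks ticks.length 0

-- ===== PRECONDITION & SPEC =====
def Spec_group_note_ons (events : List (Int × String × Int × Int)) (tol_ticks : Int) (out : List (Int × List Int)) : Prop := out = group_note_ons_alt events tol_ticks
instance (events : List (Int × String × Int × Int)) (tol_ticks : Int) (out : List (Int × List Int)) : Decidable (Spec_group_note_ons events tol_ticks out) := by unfold Spec_group_note_ons; infer_instance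

-- ===== CLAIM (what is proved, stated in full; the proofs are below) =====
def Claim_equal_group_note_ons : Prop := ∀ (events : List (Int × String × Int × Int)) (tol_ticks : Int), Dom_group_note_ons events tol_ticks → Spec_group_note_ons events tol_ticks (group_note_ons events tol_ticks)

-- ===== LEMMAS AND PROOFS =====

-- binary search meets its spec: if j splits [lo,hi) into ticks ≤ bound / > bound, the search returns j
lemma pvBsearch_eq (ticks : List Int) (bound : Int) (j : Nat) :
    ∀ n lo hi, hi - lo ≤ n → lo ≤ j → j ≤ hi →
      (∀ k, lo ≤ k → k < hi → (PySem.List.pyGetD ticks (k : Int) 0 ≤ bound ↔ k < j)) →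
      pvBsearch ticks bound n lo hi = j := by
  intro n
  induction n with
  | zero =>
      intro lo hi hn hlj hjh _
      simp only [pvBsearch]
      omega
  | succ n ih =>
      intro lo hi hn hlj hjh hchar
      rw [pvBsearch]
      by_cases hlh : lo < hi
      · simp only [hlh, if_true]
        have hm1 : lo ≤ (lo + hi) / 2 := by omega
        have hm2 : (lo + hi) / 2 < hi := by omega
        by_cases hv : PySem.List.pyGetD ticks (((lo + hi) / 2 : Nat) : Int) 0 ≤ bound
        · have hmj : (lo + hi) / 2 < j := (hchar _ hm1 hm2).mp hv
          simp only [hv, if_pos]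
          exact ih _ hi (by omega) hmj hjh (fun k hk1 hk2 => hchar k (by omega) hk2)
        · have hjm : j ≤ (lo + hi) / 2 := by
            by_contra hc
            exact hv ((hchar _ hm1 hm2).mpr (by omega))
          simp only [hv, if_neg, not_false_iff]
          exact ih lo _ (by omega) hlj hjm (fun k hk1 hk2 => hchar k hk1 (by omega))
      · simp only [hlh, if_false]
        omega

-- insertBy keeps the "no later element must come before an earlier one" invariant
lemma pairwise_insertBy {α : Type} (before : α → α → Bool)
    (asym : ∀ a b, before a b = true → before b a = false)
    (tr : ∀ a b c, before a b = true → before b c = true → before a c = true)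
    (x : α) (ys : List α) (h : ys.Pairwise fun a b => before b a = false) :
    (PySem.List.insertBy before x ys).Pairwise fun a b => before b a = false := by
  induction ys with
  | nil => simp [PySem.List.insertBy]
  | cons y ys ih =>
      rw [List.pairwise_cons] at h
      obtain ⟨hy, hys⟩ := h
      rw [PySem.List.insertBy]
      by_cases hb : before x y = true
      · simp only [hb, if_true]
        refine List.Pairwise.cons ?_ (List.Pairwise.cons hy hys)
        intro z hz
        rcases List.mem_cons.mp hz with rfl | hz'
        · exact asym _ _ hb
        · by_contra hc
          rw [Bool.not_eq_false] at hc
          have := tr z x y hc hb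
          rw [hy z hz'] at this
          exact Bool.false_ne_true this
      · simp only [hb]
        refine List.Pairwise.cons ?_ (ih hys)
        intro z hz
        rcases (PySem.List.mem_insertBy before x z ys).mp hz with rfl | hz'
        · exact Bool.not_eq_true _ |>.mp hb
        · exact hy z hz'

-- the sort A and B share yields non-decreasing first components
lemma sorted2_fst_pairwise (xs : List (Int × Int)) :
    (PySem.List.sorted2 xs Prod.fst Prod.snd).Pairwise (fun a b => a.1 ≤ b.1) := by
  unfold PySem.List.sorted2
  simp only [if_neg (by decide : ¬ (false = true))]
  have main : ∀ (l : List (Int × Int)) (acc : List (Int × Int)),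
      acc.Pairwise (fun a b =>
        (decide (b.1 < a.1) || (!decide (a.1 < b.1) && decide (b.2 < a.2))) = false) →
      (l.foldl (fun acc x =>
        PySem.List.insertBy
          (fun a b => decide (a.1 < b.1) || (!decide (b.1 < a.1) && decide (a.2 < b.2))) x acc) acc).Pairwise
        (fun a b => (decide (b.1 < a.1) || (!decide (a.1 < b.1) && decide (b.2 < a.2))) = false) := by
    intro l
    induction l with
    | nil => intro acc hacc; exact hacc
    | cons x l ih =>
        intro acc hacc
        refine ih _ (pairwise_insertBy _ ?_ ?_ x acc hacc)
        · intro a b hab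
          simp at hab ⊢
          omega
        · intro a b c hab hbc
          simp at hab hbc ⊢
          omega
  refine (main xs [] (by simp)).imp ?_
  intro a b hab
  simp only [Bool.or_eq_false_iff, decide_eq_false_iff_not] at hab
  omega

-- the element just past the takeWhile prefix fails the predicate
lemma pred_at_takeWhile_length {α : Type} (p : α → Bool) (l : List α)
    (h : (l.takeWhile p).length < l.length) :
    p (l[(l.takeWhile p).length]'h) = false := by
  induction l with
  | nil => simp at h
  | cons x xs ih =>
      by_cases hp : p x = true
      · simpa [List.takeWhile_cons, hp] using ih (by simpa [List.takeWhile_cons, hp] using h)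
      · have hp' : p x = false := by simpa using hp
        simp [hp']

-- main loop correspondence: on a list with non-decreasing first components,
-- B's binary-search jump produces exactly A's takeWhile/dropWhile step
lemma pv_main (tol : Int) (ys : List (Int × Int))
    (hmono : ∀ (p q : Nat) (hpq : p ≤ q) (hq : q < ys.length), (ys[p]'(by omega)).1 ≤ (ys[q]'hq).1) :
    ∀ fb fa i, ys.length - i ≤ fa → ys.length - i ≤ fb →
      pvBOuter (ys.map Prod.fst) (ys.map Prod.snd) tol fb i = pvAOuter tol fa (ys.drop i) := by
  have htick : ∀ (k : Nat) (hk : k < ys.length),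
      PySem.List.pyGetD (ys.map Prod.fst) (k : Int) 0 = (ys[k]'hk).1 := by
    intro k hk
    rw [PySem.List.pyGetD_natCast, List.getD_eq_getElem _ _ (by simpa using hk), List.getElem_map]
  intro fb
  induction fb with
  | zero =>
      intro fa i hfa hfb
      rw [List.drop_eq_nil_of_le (show ys.length ≤ i by omega)]
      cases fa <;> simp [pvBOuter, pvAOuter]
  | succ n ih =>
      intro fa i hfa hfb
      by_cases hi : i < ys.length
      · obtain ⟨fa', rfl⟩ : ∃ fa', fa = fa' + 1 := ⟨fa - 1, by omega⟩
        rcases hys : ys[i]'hi with ⟨t0, n0⟩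
        have htw_le : ((ys.drop (i+1)).takeWhile (fun p => decide (p.1 - t0 ≤ tol))).length ≤ (ys.drop (i+1)).length :=
          (List.takeWhile_prefix _).length_le
        have hrestlen : (ys.drop (i+1)).length = ys.length - (i+1) := by simp
        have hsplit : (ys.drop (i+1)).takeWhile (fun p => decide (p.1 - t0 ≤ tol)) ++
            (ys.drop (i+1)).dropWhile (fun p => decide (p.1 - t0 ≤ tol)) = ys.drop (i+1) :=
          List.takeWhile_append_dropWhile
        -- abbreviation
        generalize htl : ((ys.drop (i+1)).takeWhile (fun p => decide (p.1 - t0 ≤ tol))).length = tlen at htw_le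
        have hti : PySem.List.pyGetD (ys.map Prod.fst) (i : Int) 0 = t0 := by
          rw [htick i hi, hys]
        have hchar : ∀ k, i + 1 ≤ k → k < (ys.map Prod.fst).length →
            (PySem.List.pyGetD (ys.map Prod.fst) (k : Int) 0 ≤ t0 + tol ↔ k < i + 1 + tlen) := by
          intro k hk1 hk2'
          have hk2 : k < ys.length := by simpa using hk2'
          rw [htick k hk2]
          constructor
          · intro hle
            by_contra hc
            push Not at hc
            have htlt : tlen < (ys.drop (i+1)).length := by omega
            have htlt' : tlen < ys.length - (i+1) := by omega
            have hpf := pred_at_takeWhile_length (fun p => decide (p.1 - t0 ≤ tol)) (ys.drop (i+1)) (htl ▸ htlt)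
            rw [List.getElem_drop] at hpf
            have hmono' := hmono (i+1+tlen) k (by omega) hk2
            simp only [htl] at hpf
            simp only [decide_eq_false_iff_not, not_le] at hpf
            omega
          · intro hklt
            have hd : k - (i+1) < tlen := by omega
            have hd' : k - (i+1) < ((ys.drop (i+1)).takeWhile (fun p => decide (p.1 - t0 ≤ tol))).length := by omega
            have hmem := List.mem_takeWhile_imp (List.getElem_mem hd')
            rw [(List.takeWhile_prefix _).getElem hd', List.getElem_drop] at hmem
            simp only [show i + 1 + (k - (i+1)) = k from by omega] at hmem
            simp only [decide_eq_true_eq] at hmem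
            omega
        have hbs : pvBsearch (ys.map Prod.fst) (t0 + tol) ((ys.map Prod.fst).length - (i+1)) (i+1)
            ((ys.map Prod.fst).length) = i + 1 + tlen := by
          refine pvBsearch_eq _ _ _ ((ys.map Prod.fst).length - (i+1)) (i+1) _ (Nat.le_refl _)
            (by omega) (by simp; omega) hchar
        have htake : (ys.drop (i+1)).take tlen = (ys.drop (i+1)).takeWhile (fun p => decide (p.1 - t0 ≤ tol)) := by
          conv_lhs => rw [← hsplit]
          rw [← htl, List.take_left]
        have hdw : (ys.drop (i+1)).dropWhile (fun p => decide (p.1 - t0 ≤ tol)) = ys.drop (i + 1 + tlen) := by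
          have hdl := List.drop_left (l₁ := (ys.drop (i+1)).takeWhile (fun p => decide (p.1 - t0 ≤ tol)))
            (l₂ := (ys.drop (i+1)).dropWhile (fun p => decide (p.1 - t0 ≤ tol)))
          rw [hsplit, htl] at hdl
          rw [← hdl, List.drop_drop]
        have hslice : PySem.List.slice (ys.map Prod.snd) (some (i : Int)) (some ((i + 1 + tlen : Nat) : Int)) =
            n0 :: ((ys.drop (i+1)).takeWhile (fun p => decide (p.1 - t0 ≤ tol))).map Prod.snd := by
          rw [PySem.List.slice_natCast, ← List.map_drop, List.drop_eq_getElem_cons hi, hys]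
          rw [show i + 1 + tlen - i = tlen + 1 from by omega]
          rw [List.map_cons, List.take_succ_cons, ← List.map_take, htake]
        have hlt' : i < (ys.map Prod.fst).length := by simpa using hi
        rw [pvBOuter, if_pos hlt']
        simp only [hti, hbs, hslice]
        rw [List.drop_eq_getElem_cons hi, hys, pvAOuter]
        rw [hdw]
        have hih := ih fa' (i + 1 + tlen) (by omega) (by omega)
        rw [hih]
      · have h : ¬ i < (ys.map Prod.fst).length := by simp; omega
        rw [List.drop_eq_nil_of_le (show ys.length ≤ i by omega), pvBOuter, if_neg h]
        cases fa <;> simp [pvAOuter]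

-- ===== VERDICT (by name: the statement is the Claim_ definition above) =====
theorem group_note_ons_spec : Claim_equal_group_note_ons := by
  intro events tol _
  unfold Spec_group_note_ons group_note_ons group_note_ons_alt
  have hmono : ∀ (p q : Nat) (hpq : p ≤ q)
      (hq : q < (PySem.List.sorted2
        ((events.filter (fun e => e.2.1 == "noteOn" && decide (0 < e.2.2.2))).map
          (fun e => (e.1, e.2.2.1))) Prod.fst Prod.snd).length),
      ((PySem.List.sorted2
        ((events.filter (fun e => e.2.1 == "noteOn" && decide (0 < e.2.2.2))).map
          (fun e => (e.1, e.2.2.1))) Prod.fst Prod.snd)[p]'(by omega)).1 ≤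
      ((PySem.List.sorted2
        ((events.filter (fun e => e.2.1 == "noteOn" && decide (0 < e.2.2.2))).map
          (fun e => (e.1, e.2.2.1))) Prod.fst Prod.snd)[q]'hq).1 := by
    intro p q hpq hq
    rcases Nat.lt_or_ge p q with h | h
    · exact (List.pairwise_iff_getElem.mp (sorted2_fst_pairwise _)) p q (by omega) hq h
    · have hpq' : p = q := by omega
      subst hpq'; exact le_refl _
  have hmain := pv_main tol _ hmono
    ((PySem.List.sorted2
      ((events.filter (fun e => e.2.1 == "noteOn" && decide (0 < e.2.2.2))).map
        (fun e => (e.1, e.2.2.1))) Prod.fst Prod.snd).map Prod.fst).length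
    (PySem.List.sorted2
      ((events.filter (fun e => e.2.1 == "noteOn" && decide (0 < e.2.2.2))).map
        (fun e => (e.1, e.2.2.1))) Prod.fst Prod.snd).length 0 (by omega) (by simp)
  rw [List.drop_zero] at hmain
  exact hmain.symm
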